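-- pv_equiv track=rewrite | github.com/embedded-purdue/slayterHIL | tests/rc_conversion.py | interleave_commands
-- ===== SOURCE A (Python) =====
-- def interleave_commands(axis_commands):
--     """
--     Interleave RC commands across axes proportionally using a Bresenham-like
--     distribution, so diagonal movement outputs interleaved commands (e.g. RURURU)
--     instead of sequential blocks (e.g. RRRRUUU).
--
--     axis_commands: list of (command_char, num_steps) for each active axis
--     Returns: list of command characters in interleaved order
--     """
--     active = [(cmd, steps) for cmd, steps in axis_commands if steps > 0]
--     if not active:
--         return []
--
--     max_steps = max(steps for _, steps in active)
--     errors = [0] * len(active)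
--     result = []
--
--     for _ in range(max_steps):
--         for i, (cmd, steps) in enumerate(active):
--             errors[i] += steps
--             if errors[i] >= max_steps:
--                 result.append(cmd)
--                 errors[i] -= max_steps
--
--     return result
-- ===== SOURCE B (Python) =====
-- def interleave_commands(axis_commands):
--     # Per-axis closed-form emit times merged by (iteration, axis) sort,
--     # instead of A's iteration-by-iteration Bresenham error loop.
--     active = [(cmd, steps) for cmd, steps in axis_commands if steps > 0]
--     if not active:
--         return []
--     max_steps = max(steps for _, steps in active)
--     events = []
--     for i, (cmd, steps) in enumerate(active):
--         for k in range(1, steps + 1):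
--             events.append(((k * max_steps + steps - 1) // steps, i, cmd))
--     events.sort(key=lambda e: (e[0], e[1]))
--     return [cmd for _, _, cmd in events]
-- ===== Notes on version B (the rewrite author's own statement) =====
-- stated objective: alternative
-- what changed: A runs max_steps Bresenham rounds updating a shared error array and appending on overflow; B instead computes each axis's k-th emit iteration in closed form as ceil(k*max_steps/steps), collects (iteration, axis, cmd) events per axis, and merges them with one sort by (iteration, axis).
import Mathlib
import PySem

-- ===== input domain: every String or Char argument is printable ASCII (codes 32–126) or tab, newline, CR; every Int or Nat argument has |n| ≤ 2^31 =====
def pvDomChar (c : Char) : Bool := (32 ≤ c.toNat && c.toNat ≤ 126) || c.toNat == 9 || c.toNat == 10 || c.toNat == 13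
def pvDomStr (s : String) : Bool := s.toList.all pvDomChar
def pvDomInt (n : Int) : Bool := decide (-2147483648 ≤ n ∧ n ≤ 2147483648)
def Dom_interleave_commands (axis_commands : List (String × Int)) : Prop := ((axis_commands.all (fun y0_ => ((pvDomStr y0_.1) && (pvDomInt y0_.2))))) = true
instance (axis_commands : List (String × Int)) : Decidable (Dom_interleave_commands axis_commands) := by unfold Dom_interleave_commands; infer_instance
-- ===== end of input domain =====

-- B replaces A's iteration-by-iteration Bresenham error loop by per-axis closed-form
-- emit times merged with one sort (objective: alternative re-implementation).

-- ===== PORT A =====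
-- Loop body of A's inner `for i, (cmd, steps) in enumerate(active)` loop
-- (errors[i] += steps; if errors[i] >= max_steps: append cmd; errors[i] -= max_steps).
def pvStepA (M : Int) (st : List Int × List String) (ic : Int × (String × Int)) : List Int × List String :=
  let e := PySem.List.pyGetD st.1 ic.1 0 + ic.2.2
  if M ≤ e then (PySem.List.pySetD st.1 ic.1 (e - M), st.2 ++ [ic.2.1])
  else (PySem.List.pySetD st.1 ic.1 e, st.2)

-- `max(steps for _, steps in active)` is only reached when active ≠ []; the `none`
-- branch of max? is exactly A's `if not active: return []`.
def interleave_commands (axis_commands : List (String × Int)) : List String :=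
  let active := axis_commands.filter (fun cs => decide (0 < cs.2))
  match PySem.List.max? (active.map (fun cs => cs.2)) (fun y => y) with
  | none => []
  | some max_steps =>
      ((PySem.List.pyRange 0 max_steps).foldl
        (fun st (_ : Int) => (PySem.List.enumerate active 0).foldl (pvStepA max_steps) st)
        (List.replicate active.length 0, [])).2

-- ===== PORT B =====
def interleave_commands_alt (axis_commands : List (String × Int)) : List String :=
  let active := axis_commands.filter (fun cs => decide (0 < cs.2))
  match PySem.List.max? (active.map (fun cs => cs.2)) (fun y => y) with
  | none => []
  | some max_steps =>
      let events := (PySem.List.enumerate active 0).foldl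
        (fun ev ic => (PySem.List.pyRange 1 (ic.2.2 + 1)).foldl
            (fun ev2 k => ev2 ++ [(PySem.Int.floordiv (k * max_steps + ic.2.2 - 1) ic.2.2, ic.1, ic.2.1)]) ev)
        []
      (PySem.List.sorted2 events (fun e => e.1) (fun e => e.2.1)).map (fun e => e.2.2)

-- ===== PRECONDITION & SPEC =====
def Spec_interleave_commands (axis_commands : List (String × Int)) (out : List String) : Prop := out = interleave_commands_alt axis_commands
instance (axis_commands : List (String × Int)) (out : List String) : Decidable (Spec_interleave_commands axis_commands out) := by unfold Spec_interleave_commands; infer_instance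

-- ===== CLAIM (what is proved, stated in full; the proofs are below) =====
def Claim_equal_interleave_commands : Prop := ∀ (axis_commands : List (String × Int)), Dom_interleave_commands axis_commands → Spec_interleave_commands axis_commands (interleave_commands axis_commands)

-- ===== LEMMAS AND PROOFS =====


-- the k-th emit time of an axis with step count s: ceil(k*M/s) = (k*M + s - 1) // s
def pvCeil (M s k : Int) : Int := (k * M + s - 1) / s


-- the commands emitted in A's iteration T (1-based), in axis order
def pvRow (M : Int) (a : List (String × Int)) (T : Int) : List String :=
  a.filterMap (fun p => if M ≤ ((T - 1) * p.2) % M + p.2 then some p.1 else none)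

-- the event list grouped by iteration: (iteration, axis index, command)
def pvG (M : Int) (a : List (String × Int)) : List (Int × Int × String) :=
  (PySem.List.pyRange 1 (M + 1)).flatMap (fun T =>
    (PySem.List.enumerate a 0).filterMap (fun ic =>
      if M ≤ ((T - 1) * ic.2.2) % M + ic.2.2 then some (T, ic.1, ic.2.1) else none))


lemma pv_filterMap_eq_flatMap {α β : Type} (g : α → Option β) (l : List α) :
    l.filterMap g = l.flatMap (fun x => (g x).toList) := by
  induction l with
  | nil => rfl
  | cons x xs ih =>
    simp only [List.filterMap_cons, List.flatMap_cons, ← ih]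
    cases g x <;> simp

lemma pv_perm_swap {α β γ : Type} (l₁ : List α) (l₂ : List β) (h : α → β → Option γ) :
    (l₁.flatMap fun x => l₂.filterMap (h x)).Perm
      (l₂.flatMap fun y => l₁.filterMap fun x => h x y) := by
  rw [← Multiset.coe_eq_coe]
  simp only [pv_filterMap_eq_flatMap, ← Multiset.coe_bind]
  exact Multiset.bind_bind (l₁ : Multiset α) (l₂ : Multiset β)

lemma pv_map_filter {α β : Type} (f : α → β) (p : α → Bool) (l : List α) :
    (l.filter p).map f = l.filterMap (fun x => if p x then some (f x) else none) := by
  induction l with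
  | nil => rfl
  | cons x xs ih =>
    by_cases hx : p x <;> simp [List.filter_cons, hx, ih]

lemma pv_mod_step (M s T : Int) (hM : 0 < M) (hs : 0 < s) (hsM : s ≤ M) (hT : 1 ≤ T) :
    (if M ≤ ((T - 1) * s) % M + s then ((T - 1) * s) % M + s - M else ((T - 1) * s) % M + s)
      = (T * s) % M := by
  have h0 : 0 ≤ (T - 1) * s := mul_nonneg (by omega) hs.le
  have hdm := Int.mul_ediv_add_emod ((T - 1) * s) M
  set q := (T - 1) * s / M with hq
  set r := ((T - 1) * s) % M with hr
  have hr0 : 0 ≤ r := Int.emod_nonneg _ (by omega)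
  have hr1 : r < M := Int.emod_lt_of_pos _ hM
  have hTs : T * s = (r + s) + M * q := by nlinarith [hdm]
  rw [hTs, Int.add_mul_emod_self_left]
  by_cases hc : M ≤ r + s
  · have h2 : (r + s) % M = ((r + s - M) + M * 1) % M := by ring_nf
    rw [if_pos hc, h2, Int.add_mul_emod_self_left, Int.emod_eq_of_lt (by omega) (by omega)]
  · rw [if_neg hc, Int.emod_eq_of_lt (by omega) (by omega)]

lemma pv_emit_iff (M s T : Int) (hM : 0 < M) (hs : 0 < s) :
    (1 ≤ T ∧ T < M + 1 ∧ M ≤ ((T - 1) * s) % M + s) ↔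
      ∃ k, (1 ≤ k ∧ k < s + 1) ∧ T = pvCeil M s k := by
  constructor
  · rintro ⟨hT1, hTM, hcond⟩
    have h0 : 0 ≤ (T - 1) * s := mul_nonneg (by omega) hs.le
    have hdm := Int.mul_ediv_add_emod ((T - 1) * s) M
    set q := (T - 1) * s / M with hq
    set r := ((T - 1) * s) % M with hr
    have hr0 : 0 ≤ r := Int.emod_nonneg _ (by omega)
    have hr1 : r < M := Int.emod_lt_of_pos _ hM
    have hq0 : 0 ≤ q := Int.ediv_nonneg h0 hM.le
    have hqs : q < s := by
      rw [hq]
      rw [Int.ediv_lt_iff_lt_mul hM]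
      nlinarith
    refine ⟨q + 1, ⟨by omega, by omega⟩, ?_⟩
    have hle : T ≤ ((q + 1) * M + s - 1) / s := by
      rw [Int.le_ediv_iff_mul_le hs]; nlinarith
    have hlt : ((q + 1) * M + s - 1) / s < T + 1 := by
      rw [Int.ediv_lt_iff_lt_mul hs]; nlinarith
    unfold pvCeil; omega
  · rintro ⟨k, ⟨hk1, hks⟩, hTeq⟩
    have hle : T * s ≤ k * M + s - 1 := by
      rw [hTeq]
      exact (Int.le_ediv_iff_mul_le hs (a := pvCeil M s k) (b := k * M + s - 1)).mp (le_of_eq rfl)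
    have hlt : k * M + s - 1 < (T + 1) * s := by
      have h1 : pvCeil M s k < T + 1 := by omega
      exact (Int.ediv_lt_iff_lt_mul hs (a := k * M + s - 1) (b := T + 1)).mp h1
    have hbr1 : (T - 1) * s < k * M := by nlinarith
    have hbr2 : k * M ≤ T * s := by nlinarith
    have hT1 : 1 ≤ T := by nlinarith
    have hTM : T < M + 1 := by
      have hkM : k * M ≤ s * M := mul_le_mul_of_nonneg_right (by omega) hM.le
      nlinarith
    refine ⟨hT1, hTM, ?_⟩
    have h0 : 0 ≤ (T - 1) * s := mul_nonneg (by omega) hs.le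
    have hdm := Int.mul_ediv_add_emod ((T - 1) * s) M
    set q := (T - 1) * s / M with hq
    set r := ((T - 1) * s) % M with hr
    have hr0 : 0 ≤ r := Int.emod_nonneg _ (by omega)
    have hr1 : r < M := Int.emod_lt_of_pos _ hM
    by_contra hcon
    push_neg at hcon
    have hkq : k ≤ q := by
      have hx : k * M < (q + 1) * M := by nlinarith
      have := lt_of_mul_lt_mul_right hx hM.le
      omega
    have : k * M ≤ q * M := mul_le_mul_of_nonneg_right hkq hM.le
    nlinarith

lemma pv_ceil_mono (M s : Int) (hs : 0 < s) (hsM : s ≤ M) {k k' : Int} (hk : k < k') :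
    pvCeil M s k < pvCeil M s k' := by
  unfold pvCeil
  have h1 : (k * M + s - 1) / s + 1 = ((k * M + s - 1) + 1 * s) / s := by
    rw [Int.add_mul_ediv_right _ _ (by omega)]
  have h2 : (k * M + s - 1) + 1 * s ≤ k' * M + s - 1 := by
    have : (k + 1) * M ≤ k' * M := mul_le_mul_of_nonneg_right (by omega) (by omega)
    nlinarith
  have h3 := Int.ediv_le_ediv hs h2
  omega

lemma pv_emitTimes (M s : Int) (hM : 0 < M) (hs : 0 < s) (hsM : s ≤ M) :
    (PySem.List.pyRange 1 (s + 1)).map (pvCeil M s)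
      = (PySem.List.pyRange 1 (M + 1)).filter (fun T => decide (M ≤ ((T - 1) * s) % M + s)) := by
  have hpl : ((PySem.List.pyRange 1 (s + 1)).map (pvCeil M s)).Pairwise (· < ·) := by
    rw [List.pairwise_map]
    exact (PySem.List.pairwise_lt_pyRange_one 1 (s + 1)).imp (fun h => pv_ceil_mono M s hs hsM h)
  have hpr : ((PySem.List.pyRange 1 (M + 1)).filter (fun T => decide (M ≤ ((T - 1) * s) % M + s))).Pairwise (· < ·) :=
    (PySem.List.pairwise_lt_pyRange_one 1 (M + 1)).filter _
  have hperm : ((PySem.List.pyRange 1 (s + 1)).map (pvCeil M s)).Perm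
      ((PySem.List.pyRange 1 (M + 1)).filter (fun T => decide (M ≤ ((T - 1) * s) % M + s))) := by
    rw [List.perm_ext_iff_of_nodup (hpl.imp ne_of_lt) (hpr.imp ne_of_lt)]
    intro T
    rw [List.mem_filter, List.mem_map]
    simp only [PySem.List.mem_pyRange_one, decide_eq_true_eq]
    have hiff := pv_emit_iff M s T hM hs
    constructor
    · rintro ⟨k, hk, rfl⟩
      have := hiff.mpr ⟨k, hk, rfl⟩; tauto
    · rintro ⟨⟨h1, h2⟩, h3⟩
      obtain ⟨k, hk, hTeq⟩ := hiff.mp ⟨h1, h2, h3⟩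
      exact ⟨k, hk, hTeq.symm⟩
  exact List.eq_of_perm_of_sorted (fun a b _ _ hab hba => by omega) hpl hpr hperm

lemma pv_innerFold (M : Int) (rest : List (String × Int)) :
    ∀ (pre er : List Int) (res : List String), er.length = rest.length →
    (PySem.List.enumerate rest (pre.length : Int)).foldl (pvStepA M) (pre ++ er, res)
      = (pre ++ List.zipWith (fun e p => if M ≤ e + p.2 then e + p.2 - M else e + p.2) er rest,
         res ++ (er.zip rest).filterMap (fun ep => if M ≤ ep.1 + ep.2.2 then some ep.2.1 else none)) := by
  induction rest with
  | nil =>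
    intro pre er res hlen
    have : er = [] := List.length_eq_zero_iff.mp (by simpa using hlen)
    subst this
    simp [PySem.List.enumerate_nil]
  | cons p rest ih =>
    intro pre er res hlen
    match er with
    | e :: er' =>
      simp only [PySem.List.enumerate_cons, List.foldl_cons]
      have hget : PySem.List.pyGetD (pre ++ e :: er') (pre.length : Int) 0 = e := by
        rw [PySem.List.pyGetD_natCast, List.getD_append_right _ _ _ _ (le_refl _)]
        simp
      have hset : ∀ v : Int, PySem.List.pySetD (pre ++ e :: er') (pre.length : Int) v = (pre ++ [v]) ++ er' := by
        intro v
        rw [PySem.List.pySetD_natCast, List.set_append_right _ _ (le_refl _)]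
        simp
      have hstep : pvStepA M (pre ++ e :: er', res) ((pre.length : Int), p)
          = ((pre ++ [if M ≤ e + p.2 then e + p.2 - M else e + p.2]) ++ er',
             res ++ if M ≤ e + p.2 then [p.1] else []) := by
        simp only [pvStepA, hget, hset]
        split <;> simp
      rw [hstep]
      have hlen' : ((pre.length : Int) + 1) = (((pre ++ [if M ≤ e + p.2 then e + p.2 - M else e + p.2]).length : Nat) : Int) := by
        simp
      rw [hlen', ih _ er' _ (by simpa using hlen)]
      simp only [List.zipWith_cons_cons, List.zip_cons_cons, List.filterMap_cons]
      split <;> simp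
    | [] => simp at hlen

lemma pv_roundStep (M : Int) (a : List (String × Int)) (hM : 0 < M)
    (ha : ∀ p ∈ a, 0 < p.2 ∧ p.2 ≤ M) (T : Int) (hT : 1 ≤ T) (res : List String) :
    (PySem.List.enumerate a 0).foldl (pvStepA M) (a.map (fun p => ((T - 1) * p.2) % M), res)
      = (a.map (fun p => (T * p.2) % M), res ++ pvRow M a T) := by
  have h0 : (0 : Int) = ((([] : List Int).length : Nat) : Int) := by simp
  have h1 := pv_innerFold M a [] (a.map (fun p => ((T - 1) * p.2) % M)) res (by simp)
  rw [h0]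
  simp only [List.nil_append] at h1
  rw [h1, Prod.mk.injEq]
  refine ⟨?_, ?_⟩
  · rw [List.zipWith_map_left, List.zipWith_self]
    exact List.map_congr_left (fun p hp => pv_mod_step M p.2 T hM (ha p hp).1 (ha p hp).2 hT)
  · congr 1
    have hz : (a.map (fun p => ((T - 1) * p.2) % M)).zip a
        = a.map (fun p => (((T - 1) * p.2) % M, p)) := by
      rw [List.zip_map_left]
      have : a.zip a = a.map (fun p => (p, p)) := by
        rw [List.zip_eq_zipWith, List.zipWith_self]
      rw [this, List.map_map]; rfl
    rw [hz, List.filterMap_map]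
    unfold pvRow
    rfl

lemma pv_outerFold (M : Int) (a : List (String × Int)) (hM : 0 < M)
    (ha : ∀ p ∈ a, 0 < p.2 ∧ p.2 ≤ M) (n : Nat) :
    (PySem.List.pyRange 0 (n : Int)).foldl
        (fun st (_ : Int) => (PySem.List.enumerate a 0).foldl (pvStepA M) st)
        (List.replicate a.length 0, [])
      = (a.map (fun p => ((n : Int) * p.2) % M),
         (PySem.List.pyRange 1 ((n : Int) + 1)).flatMap (pvRow M a)) := by
  induction n with
  | zero =>
    rw [show ((0 : Nat) : Int) = 0 by simp, PySem.List.pyRange_one_eq_nil (le_refl 0),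
        PySem.List.pyRange_one_eq_nil (by omega)]
    simp [← List.map_const']
  | succ n ih =>
    rw [show ((n + 1 : Nat) : Int) = (n : Int) + 1 by push_cast; ring,
        PySem.List.pyRange_one_succ_right (by positivity), List.foldl_append, ih]
    simp only [List.foldl_cons, List.foldl_nil]
    have hmap : (List.map (fun p => (n : Int) * p.2 % M) a)
        = List.map (fun p => ((n : Int) + 1 - 1) * p.2 % M) a := by
      apply List.map_congr_left; intro p _; ring_nf
    rw [hmap, pv_roundStep M a hM ha ((n : Int) + 1) (by omega) _]
    conv_rhs => rw [PySem.List.pyRange_one_succ_right (show (1 : Int) ≤ (n : Int) + 1 by omega),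
                    List.flatMap_append]
    simp

lemma pv_lex_bool {α : Type} (k1 k2 : α → Int) :
    (fun (a b : α) => decide (k1 a < k1 b) || (!decide (k1 b < k1 a) && decide (k2 a < k2 b)))
      = (fun (a b : α) => decide ((fun x => toLex (k1 x, k2 x)) a < (fun x => toLex (k1 x, k2 x)) b)) := by
  funext a b
  simp only [Prod.Lex.lt_iff]
  rcases lt_trichotomy (k1 a) (k1 b) with h | h | h
  · simp [h]
  · simp [h]
  · simp [asymm h, ne_of_gt h]
    intro h2
    exact absurd (lt_of_lt_of_le h h2) (lt_irrefl _)

lemma pv_sorted2_eq {α : Type} (k1 k2 : α → Int) (xs ys : List α)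
    (hperm : ys.Perm xs)
    (hsort : ys.Pairwise (fun a b => k1 a < k1 b ∨ (k1 a = k1 b ∧ k2 a < k2 b))) :
    PySem.List.sorted2 xs k1 k2 = ys := by
  have h : PySem.List.sorted2 xs k1 k2 = PySem.List.sorted xs (fun x => toLex (k1 x, k2 x)) := by
    simp only [PySem.List.sorted2, PySem.List.sorted, pv_lex_bool k1 k2, Bool.false_eq_true, if_false]
  rw [h]
  apply PySem.List.sorted_eq_of_perm_of_pairwise_lt xs ys _ hperm
  refine hsort.imp ?_
  intro a b hab
  simp only [Prod.Lex.lt_iff, ofLex_toLex]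
  exact hab

lemma pv_G_pairwise (M : Int) (a : List (String × Int)) :
    (pvG M a).Pairwise (fun x y => x.1 < y.1 ∨ (x.1 = y.1 ∧ x.2.1 < y.2.1)) := by
  unfold pvG
  rw [List.pairwise_flatMap]
  constructor
  · intro T _
    rw [List.pairwise_filterMap]
    refine (PySem.List.pairwise_lt_enumerate a 0).imp ?_
    intro p q hpq x hx y hy
    split at hx <;> split at hy <;> simp_all <;> subst hx <;> subst hy <;> simp [hpq]
  · refine (PySem.List.pairwise_lt_pyRange_one 1 (M + 1)).imp ?_
    intro T T' hTT x hx y hy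
    rw [List.mem_filterMap] at hx hy
    obtain ⟨px, _, hpx⟩ := hx
    obtain ⟨py, _, hpy⟩ := hy
    split at hpx <;> split at hpy <;> simp_all <;> subst hpx <;> subst hpy <;> simp [hTT]

lemma pv_events_perm (M : Int) (a : List (String × Int)) (hM : 0 < M)
    (ha : ∀ p ∈ a, 0 < p.2 ∧ p.2 ≤ M) :
    ((PySem.List.enumerate a 0).flatMap (fun ic =>
        (PySem.List.pyRange 1 (ic.2.2 + 1)).map (fun k => (pvCeil M ic.2.2 k, ic.1, ic.2.1)))).Perm
      (pvG M a) := by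
  have hmem : ∀ ic ∈ PySem.List.enumerate a 0, ic.2 ∈ a := by
    intro ic hic
    rw [PySem.List.mem_enumerate_iff] at hic
    obtain ⟨k, hk, rfl⟩ := hic
    exact List.getElem_mem hk
  have hstep : (PySem.List.enumerate a 0).flatMap (fun ic =>
        (PySem.List.pyRange 1 (ic.2.2 + 1)).map (fun k => (pvCeil M ic.2.2 k, ic.1, ic.2.1)))
      = (PySem.List.enumerate a 0).flatMap (fun ic =>
        (PySem.List.pyRange 1 (M + 1)).filterMap (fun T =>
          if M ≤ ((T - 1) * ic.2.2) % M + ic.2.2 then some (T, ic.1, ic.2.1) else none)) := by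
    apply List.flatMap_congr
    intro ic hic
    obtain ⟨hs, hsM⟩ := ha ic.2 (hmem ic hic)
    have h1 : (PySem.List.pyRange 1 (ic.2.2 + 1)).map (fun k => (pvCeil M ic.2.2 k, ic.1, ic.2.1))
        = ((PySem.List.pyRange 1 (ic.2.2 + 1)).map (pvCeil M ic.2.2)).map (fun t => (t, ic.1, ic.2.1)) := by
      rw [List.map_map]; rfl
    rw [h1, pv_emitTimes M ic.2.2 hM hs hsM, pv_map_filter]
    apply List.filterMap_congr
    intro T _
    split <;> simp_all
  rw [hstep]
  exact pv_perm_swap _ _ _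

lemma pv_map_snd_G (M : Int) (a : List (String × Int)) :
    (pvG M a).map (fun e => e.2.2) = (PySem.List.pyRange 1 (M + 1)).flatMap (pvRow M a) := by
  unfold pvG pvRow
  rw [List.map_flatMap]
  apply List.flatMap_congr
  intro T _
  rw [List.map_filterMap]
  have h2 : a = (PySem.List.enumerate a 0).map (fun ic => ic.2) := (PySem.List.map_snd_enumerate a 0).symm
  conv_rhs => rw [h2, List.filterMap_map]
  apply List.filterMap_congr
  intro ic _
  simp only [Function.comp]
  split <;> simp_all

-- ===== VERDICT (by name: the statement is the Claim_ definition above) =====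
theorem interleave_commands_spec : Claim_equal_interleave_commands := by
  intro ac _
  unfold Spec_interleave_commands
  cases hmax : PySem.List.max? ((ac.filter (fun cs => decide (0 < cs.2))).map (fun cs => cs.2)) (fun y => y) with
  | none => simp only [interleave_commands, interleave_commands_alt, hmax]
  | some M =>
    simp only [interleave_commands, interleave_commands_alt, hmax]
    set active := ac.filter (fun cs => decide (0 < cs.2)) with hact
    have hmem := PySem.List.max?_mem hmax
    have hisM := PySem.List.max?_isMax hmax
    have ha : ∀ p ∈ active, 0 < p.2 ∧ p.2 ≤ M := by
      intro p hp
      have h1 : (0 < p.2) := by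
        have := List.mem_filter.mp hp
        simpa using this.2
      exact ⟨h1, hisM p.2 (List.mem_map.mpr ⟨p, hp, rfl⟩)⟩
    have hM : 0 < M := by
      obtain ⟨p, hp, hpe⟩ := List.mem_map.mp hmem
      have := (ha p hp).1
      omega
    have hn : ((M.toNat : Nat) : Int) = M := Int.toNat_of_nonneg hM.le
    have hA := pv_outerFold M active hM ha M.toNat
    rw [hn] at hA
    -- B: flatten the two event-building folds into one flatMap of per-axis emit times
    have hb : (fun (ev : List (Int × Int × String)) (ic : Int × (String × Int)) =>
          (PySem.List.pyRange 1 (ic.2.2 + 1)).foldl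
            (fun ev2 k => ev2 ++ [(PySem.Int.floordiv (k * M + ic.2.2 - 1) ic.2.2, ic.1, ic.2.1)]) ev)
        = (fun ev ic => ev ++ (PySem.List.pyRange 1 (ic.2.2 + 1)).map
            (fun k => (PySem.Int.floordiv (k * M + ic.2.2 - 1) ic.2.2, ic.1, ic.2.1))) := by
      funext ev ic
      rw [PySem.List.foldl_append_singleton_eq_map]
    rw [hb, PySem.List.foldl_append_eq_flatMap, List.nil_append]
    have hflat : (PySem.List.enumerate active 0).flatMap (fun ic =>
          (PySem.List.pyRange 1 (ic.2.2 + 1)).map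
            (fun k => (PySem.Int.floordiv (k * M + ic.2.2 - 1) ic.2.2, ic.1, ic.2.1)))
        = (PySem.List.enumerate active 0).flatMap (fun ic =>
          (PySem.List.pyRange 1 (ic.2.2 + 1)).map (fun k => (pvCeil M ic.2.2 k, ic.1, ic.2.1))) := by
      apply List.flatMap_congr
      intro ic hic
      have hs : 0 < ic.2.2 := by
        rw [PySem.List.mem_enumerate_iff] at hic
        obtain ⟨j, hj, rfl⟩ := hic
        exact (ha _ (List.getElem_mem hj)).1
      apply List.map_congr_left
      intro k _
      rw [PySem.Int.floordiv_eq_ediv_of_pos hs]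
      rfl
    rw [hflat]
    have hsorted : PySem.List.sorted2
        ((PySem.List.enumerate active 0).flatMap (fun ic =>
          (PySem.List.pyRange 1 (ic.2.2 + 1)).map (fun k => (pvCeil M ic.2.2 k, ic.1, ic.2.1))))
        (fun e => e.1) (fun e => e.2.1) = pvG M active :=
      pv_sorted2_eq _ _ _ _ (pv_events_perm M active hM ha).symm (pv_G_pairwise M active)
    rw [hsorted, pv_map_snd_G, hA]
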